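-- pv_equiv track=rewrite | github.com/Honestopedia-TECHAFAQ/Advanced-Algebra-Theoretical-Problems-Expert | main.py | create_karnaugh_map
-- ===== SOURCE A (Python) =====
-- def create_karnaugh_map(minterms):
--     k_map = [['0', '0'], ['0', '0']]
--     for m in minterms:
--         if m == 0:
--             k_map[0][0] = '1'
--         elif m == 1:
--             k_map[0][1] = '1'
--         elif m == 2:
--             k_map[1][0] = '1'
--         elif m == 3:
--             k_map[1][1] = '1'
--     return k_map
-- ===== SOURCE B (Python) =====
-- def create_karnaugh_map(minterms):
--     return [['1' if 2 * r + c in minterms else '0' for c in (0, 1)]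
--             for r in (0, 1)]
-- ===== Notes on version B (the rewrite author's own statement) =====
-- stated objective: idiomatic
-- what changed: Replaces the mutating loop with an if/elif chain by a single comprehension that builds the 2x2 grid directly from four membership tests (cell (r,c) is '1' iff 2*r+c is in minterms).
import Mathlib
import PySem

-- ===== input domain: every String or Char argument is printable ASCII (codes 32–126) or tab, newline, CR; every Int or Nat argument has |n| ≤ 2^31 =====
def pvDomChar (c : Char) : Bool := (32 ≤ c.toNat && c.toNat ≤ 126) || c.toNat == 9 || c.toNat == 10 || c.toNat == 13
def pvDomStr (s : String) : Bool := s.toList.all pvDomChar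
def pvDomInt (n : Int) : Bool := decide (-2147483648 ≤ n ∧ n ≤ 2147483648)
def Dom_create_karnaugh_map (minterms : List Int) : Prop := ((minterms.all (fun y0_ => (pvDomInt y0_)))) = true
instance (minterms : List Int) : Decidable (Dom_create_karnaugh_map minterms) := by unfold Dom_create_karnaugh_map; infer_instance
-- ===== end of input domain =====

-- ===== PORT A =====
-- B builds the 2x2 grid directly from membership tests instead of A's mutating loop (idiomatic decomposition).
-- loop body of A: mutate the 2x2 state [[a,b],[c,d]] according to m
def kmStep (g : List (List String)) (m : Int) : List (List String) :=
  if m == 0 then g.set 0 ((g.getD 0 []).set 0 "1")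
  else if m == 1 then g.set 0 ((g.getD 0 []).set 1 "1")
  else if m == 2 then g.set 1 ((g.getD 1 []).set 0 "1")
  else if m == 3 then g.set 1 ((g.getD 1 []).set 1 "1")
  else g

def create_karnaugh_map (minterms : List Int) : List (List String) :=
  minterms.foldl kmStep [["0", "0"], ["0", "0"]]

-- ===== PORT B =====
def create_karnaugh_map_alt (minterms : List Int) : List (List String) :=
  ([0, 1] : List Int).map (fun r =>
    ([0, 1] : List Int).map (fun c =>
      if 2 * r + c ∈ minterms then "1" else "0"))

-- ===== PRECONDITION & SPEC =====
def Spec_create_karnaugh_map (minterms : List Int) (out : List (List String)) : Prop := out = create_karnaugh_map_alt minterms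
instance (minterms : List Int) (out : List (List String)) : Decidable (Spec_create_karnaugh_map minterms out) := by unfold Spec_create_karnaugh_map; infer_instance

-- ===== CLAIM =====
def Claim_equal_create_karnaugh_map : Prop := ∀ (minterms : List Int), Dom_create_karnaugh_map minterms → Spec_create_karnaugh_map minterms (create_karnaugh_map minterms)

-- ===== LEMMAS AND PROOFS =====
-- cell (i,j) of the fold's result: "1" if the minterm occurred, else the starting cell
theorem km_fold_char (ms : List Int) (a b c d : String) :
    ms.foldl kmStep [[a, b], [c, d]] =
      [[if 0 ∈ ms then "1" else a, if 1 ∈ ms then "1" else b],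
       [if 2 ∈ ms then "1" else c, if 3 ∈ ms then "1" else d]] := by
  induction ms generalizing a b c d with
  | nil => simp
  | cons m t ih =>
    simp only [List.foldl_cons, kmStep, List.mem_cons]
    by_cases h0 : m = 0
    · subst h0; simp [ih]
    · by_cases h1 : m = 1
      · subst h1; simp [ih]
      · by_cases h2 : m = 2
        · subst h2; simp [ih]
        · by_cases h3 : m = 3
          · subst h3; simp [ih]
          · simp only [beq_iff_eq, h0, h1, h2, h3, if_false, ih]
            simp [Ne.symm h0, Ne.symm h1, Ne.symm h2, Ne.symm h3]

-- ===== VERDICT =====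
theorem create_karnaugh_map_spec : Claim_equal_create_karnaugh_map := by
  intro ms _
  unfold Spec_create_karnaugh_map create_karnaugh_map create_karnaugh_map_alt
  rw [km_fold_char]
  norm_num
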